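-- pv_equiv track=rewrite | github.com/VerisimilitudeX/RPS-Wars-Project | Word Game.py | change_letter_list
-- ===== SOURCE A (Python) =====
-- def change_letter_list(letter_list, word):
--     starting = len(letter_list)
--     repeat_letters = []
--
--
--     for letter in word:
--         if not letter in repeat_letters:
--             repeat_letters.append(letter)
--             if letter in letter_list:
--                 letter_list.remove(letter)
--             else:
--                 letter_list.append(letter)
--
--     ending = len(letter_list)
--     difference = ending - starting
--     return difference
-- ===== SOURCE B (Python) =====
-- def change_letter_list(letter_list, word):
--     # Closed form: each unique letter toggles independently (the toggles touch
--     # pairwise-distinct letters, so membership at toggle time equals original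
--     # membership). Net change = (#unique absent) - (#unique present).
--     uniq = set(word)
--     present = sum(1 for c in uniq if c in letter_list)
--     return len(uniq) - 2 * present
-- ===== Notes on version B (the rewrite author's own statement) =====
-- stated objective: alternative
-- what changed: B replaces A's sequential toggle loop with a closed-form count: the toggles act on pairwise-distinct letters and are therefore independent, so the result is len(set(word)) - 2*(number of unique letters already present); B performs no list mutation (return value only).
import Mathlib
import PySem

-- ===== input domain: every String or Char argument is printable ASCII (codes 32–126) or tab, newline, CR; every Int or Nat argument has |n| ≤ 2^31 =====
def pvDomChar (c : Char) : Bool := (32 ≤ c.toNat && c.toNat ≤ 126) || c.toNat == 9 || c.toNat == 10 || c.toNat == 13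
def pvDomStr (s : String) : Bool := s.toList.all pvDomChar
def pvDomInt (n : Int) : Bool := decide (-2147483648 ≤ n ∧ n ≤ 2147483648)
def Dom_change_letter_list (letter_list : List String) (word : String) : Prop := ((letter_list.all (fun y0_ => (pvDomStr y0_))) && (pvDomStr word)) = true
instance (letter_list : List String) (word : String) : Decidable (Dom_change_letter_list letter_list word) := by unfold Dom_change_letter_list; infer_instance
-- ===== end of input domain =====

-- B replaces A's sequential toggle loop by a closed-form count (the toggles are independent,
-- acting on pairwise-distinct letters); B does not mutate letter_list in Python, so the
-- equivalence proved here is about the RETURN value only (objective: alternative).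


-- ===== PORT A =====
-- step of A's loop: state = (letter_list, repeat_letters)
def pvAStep (st : List String × List Char) (c : Char) : List String × List Char :=
  if c ∈ st.2 then st
  else
    ( if String.ofList [c] ∈ st.1 then st.1.erase (String.ofList [c]) else st.1 ++ [String.ofList [c]]
    , st.2 ++ [c] )

def change_letter_list (letter_list : List String) (word : String) : Int :=
  let starting : Int := letter_list.length
  let final := word.toList.foldl pvAStep (letter_list, [])
  let ending : Int := final.1.length
  ending - starting

-- ===== PORT B =====
def change_letter_list_alt (letter_list : List String) (word : String) : Int :=
  let uniq := PySem.Set.ofList word.toList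
  let present : Int := (uniq.filter (fun c => String.ofList [c] ∈ letter_list)).length
  (uniq.length : Int) - 2 * present

-- ===== PRECONDITION & SPEC =====
def Spec_change_letter_list (letter_list : List String) (word : String) (out : Int) : Prop := out = change_letter_list_alt letter_list word
instance (letter_list : List String) (word : String) (out : Int) : Decidable (Spec_change_letter_list letter_list word out) := by unfold Spec_change_letter_list; infer_instance

-- ===== CLAIM (what is proved, stated in full; the proofs are below) =====
def Claim_equal_change_letter_list : Prop := ∀ (letter_list : List String) (word : String), Dom_change_letter_list letter_list word → Spec_change_letter_list letter_list word (change_letter_list letter_list word)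

-- ===== LEMMAS AND PROOFS =====

-- the bare toggle on the letter list
def pvToggle (lst : List String) (c : Char) : List String :=
  if String.ofList [c] ∈ lst then lst.erase (String.ofList [c]) else lst ++ [String.ofList [c]]

-- dedup of cs relative to already-seen letters
def pvDD (cs : List Char) (seen : List Char) : List Char :=
  match cs with
  | [] => []
  | c :: cs => if c ∈ seen then pvDD cs seen else c :: pvDD cs (seen ++ [c])

theorem pvA_fold_eq (cs : List Char) (lst : List String) (seen : List Char) :
    (cs.foldl pvAStep (lst, seen)).1 = (pvDD cs seen).foldl pvToggle lst := by
  induction cs generalizing lst seen with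
  | nil => rfl
  | cons c cs ih =>
    by_cases h : c ∈ seen
    · simp [pvDD, h, pvAStep, List.foldl, ih]
    · simp [pvDD, h, pvAStep, List.foldl, ih, pvToggle]

theorem pvFoldAdd_eq_DD (cs : List Char) (acc : List Char) :
    cs.foldl PySem.Set.add acc = acc ++ pvDD cs acc := by
  induction cs generalizing acc with
  | nil => simp [pvDD]
  | cons c cs ih =>
    by_cases h : c ∈ acc <;>
      simp [List.foldl, PySem.Set.add, h, pvDD, ih, List.append_assoc]

theorem pvOfList_eq_DD (cs : List Char) : PySem.Set.ofList cs = pvDD cs [] := by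
  rw [PySem.Set.ofList_eq_foldl, pvFoldAdd_eq_DD]; simp

theorem pvDD_nodup (cs seen : List Char) : (pvDD cs seen).Nodup ∧ ∀ c ∈ seen, c ∉ pvDD cs seen := by
  induction cs generalizing seen with
  | nil => simp [pvDD]
  | cons c cs ih =>
    by_cases h : c ∈ seen
    · simpa [pvDD, h] using ih seen
    · have ⟨h1, h2⟩ := ih (seen ++ [c])
      refine ⟨?_, ?_⟩
      · simp only [pvDD, h, if_neg, not_false_iff, List.nodup_cons]
        exact ⟨h2 c (by simp), h1⟩
      · intro d hd
        simp only [pvDD, h, if_neg, not_false_iff, List.mem_cons, not_or]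
        exact ⟨fun he => h (he ▸ hd), h2 d (by simp [hd])⟩

theorem pvSingleton_inj {c d : Char} (h : String.ofList [c] = String.ofList [d]) : c = d := by
  have := congrArg String.toList h
  simpa using this

theorem pvToggle_mem {lst : List String} {c d : Char} (hne : d ≠ c) :
    (String.ofList [d] ∈ pvToggle lst c) ↔ (String.ofList [d] ∈ lst) := by
  have hs : String.ofList [d] ≠ String.ofList [c] := fun h => hne (pvSingleton_inj h)
  unfold pvToggle
  split
  · exact List.mem_erase_of_ne hs
  · simp [hs]

theorem pvToggle_fold_len (us : List Char) (lst : List String) (h : us.Nodup) :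
    ((us.foldl pvToggle lst).length : Int)
      = (lst.length : Int) + us.length
        - 2 * ((us.filter (fun c => String.ofList [c] ∈ lst)).length : Int) := by
  induction us generalizing lst with
  | nil => simp
  | cons c us ih =>
    have hcn : c ∉ us := (List.nodup_cons.mp h).1
    have hnd : us.Nodup := (List.nodup_cons.mp h).2
    have hfilter : us.filter (fun d => decide (String.ofList [d] ∈ pvToggle lst c))
        = us.filter (fun d => decide (String.ofList [d] ∈ lst)) := by
      apply List.filter_congr
      intro d hd
      have : d ≠ c := fun he => hcn (he ▸ hd)
      simp [pvToggle_mem this]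
    by_cases hc : String.ofList [c] ∈ lst
    · have hlen : (pvToggle lst c).length = lst.length - 1 := by
        simp [pvToggle, hc, List.length_erase_of_mem hc]
      have hpos : 0 < lst.length := List.length_pos_of_mem hc
      rw [List.foldl_cons, ih _ hnd, hfilter, hlen]
      simp [hc]
      omega
    · have hlen : (pvToggle lst c).length = lst.length + 1 := by
        simp [pvToggle, hc]
      rw [List.foldl_cons, ih _ hnd, hfilter, hlen]
      simp [hc]
      omega

-- ===== VERDICT (by name: the statement is the Claim_ definition above) =====
theorem change_letter_list_spec : Claim_equal_change_letter_list := by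
  intro ls w _
  show _ = _
  simp only [change_letter_list, change_letter_list_alt]
  rw [pvA_fold_eq, ← pvOfList_eq_DD,
    pvToggle_fold_len _ _ (by rw [pvOfList_eq_DD]; exact (pvDD_nodup _ _).1)]
  omega
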